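-- pv_equiv track=rewrite | github.com/MikWink/AoC-2023-public | day3.py | checkLeftNeighbours
-- ===== SOURCE A (Python) =====
-- def checkLeftNeighbours(line, index):
--     reversed_number = ""
--     while index > 0 and not line[index] == ".":
--         index -= 1
--         if line[index].isdigit():
--             reversed_number += line[index]
--     if reversed_number:
--         return int(reversed_number[::-1])
--     else:
--         return 0
-- ===== SOURCE B (Python) =====
-- def checkLeftNeighbours(line, index):
--     if index <= 0 or line[index] == ".":
--         return 0
--     start = line.rfind(".", 0, index)
--     digits = "".join(c for c in line[start + 1:index] if c.isdigit())
--     return int(digits) if digits else 0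
-- ===== Notes on version B (the rewrite author's own statement) =====
-- stated objective: idiomatic
-- what changed: Replaces the hand-rolled leftward character-by-character scan with char-wise string concatenation by a library boundary search (str.rfind for the nearest '.'), one slice, and a single digit-filtering pass over the segment.
import Mathlib
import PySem

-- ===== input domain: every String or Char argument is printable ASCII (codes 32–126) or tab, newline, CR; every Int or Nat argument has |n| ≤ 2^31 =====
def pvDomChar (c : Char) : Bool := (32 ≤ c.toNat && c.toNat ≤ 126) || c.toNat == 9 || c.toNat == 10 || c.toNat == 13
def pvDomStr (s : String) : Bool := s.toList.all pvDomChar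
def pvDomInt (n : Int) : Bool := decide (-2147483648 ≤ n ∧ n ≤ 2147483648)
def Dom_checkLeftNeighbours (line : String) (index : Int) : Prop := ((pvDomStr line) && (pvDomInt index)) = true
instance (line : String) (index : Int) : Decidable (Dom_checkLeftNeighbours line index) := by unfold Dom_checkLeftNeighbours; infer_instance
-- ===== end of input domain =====

-- B replaces A's hand-rolled leftward character scan by str.rfind for the nearest '.', one slice
-- and a single digit-filtering pass (idiomatic; same asymptotic cost).

-- ===== PORT A =====
-- A's while loop: fuel = the current value of `index`; each iteration checks line[index],
-- decrements, and appends line[index] to the accumulator if it is a digit.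
-- (pyGetD with a dummy default is exact under Pre_, which keeps every accessed position in range;
--  PySem.Chars.isdigit is Python's str.isdigit on one character, exact on the ASCII domain.)
def pvALoop (cs : List Char) : Nat → List Char → List Char
  | 0, acc => acc
  | Nat.succ n, acc =>
      if PySem.List.pyGetD cs ((n : Int) + 1) '?' == '.' then acc
      else pvALoop cs n
        (acc ++ (if PySem.Chars.isdigit (PySem.List.pyGetD cs (n : Int) '?')
                 then [PySem.List.pyGetD cs (n : Int) '?'] else []))

def checkLeftNeighbours (line : String) (index : Int) : Int :=
  let rev := pvALoop line.toList index.toNat []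
  if rev ≠ [] then (PySem.Int.ofChars? rev.reverse).getD 0 else 0

-- ===== PORT B =====
-- transliteration of Source B: guard, line.rfind(".", 0, index), slice line[start+1:index],
-- filter the digits, int() if non-empty
def checkLeftNeighbours_alt (line : String) (index : Int) : Int :=
  let cs := line.toList
  if index ≤ 0 || (PySem.List.pyGetD cs index '?' == '.') then 0
  else
    let start := PySem.Chars.rfindFrom cs ['.'] 0 (some index)
    let digits := (PySem.List.slice cs (some (start + 1)) (some index)).filter
      (fun c => PySem.Chars.isdigit c)
    if digits ≠ [] then (PySem.Int.ofChars? digits).getD 0 else 0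

-- ===== PRECONDITION & SPEC =====
-- Pre_ excludes exactly the inputs where Python A raises IndexError: a positive index past the end.
def Pre_checkLeftNeighbours (line : String) (index : Int) : Prop :=
  0 < index → index < PySem.Str.len line
instance (line : String) (index : Int) : Decidable (Pre_checkLeftNeighbours line index) := by
  unfold Pre_checkLeftNeighbours; infer_instance

def pvWitness_checkLeftNeighbours : String × Int := ("12.34", 4)

def Spec_checkLeftNeighbours (line : String) (index : Int) (out : Int) : Prop := out = checkLeftNeighbours_alt line index
instance (line : String) (index : Int) (out : Int) : Decidable (Spec_checkLeftNeighbours line index out) := by unfold Spec_checkLeftNeighbours; infer_instance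

-- ===== CLAIM (what is proved, stated in full; the proofs are below) =====
def Claim_equal_checkLeftNeighbours : Prop := ∀ (line : String) (index : Int), Dom_checkLeftNeighbours line index → Pre_checkLeftNeighbours line index → Spec_checkLeftNeighbours line index (checkLeftNeighbours line index)

-- ===== LEMMAS AND PROOFS =====

-- the two defining equations of PySem.Chars.rfind.go and the unfolding of rfind
theorem pv_go_zero (s sub : List Char) :
    PySem.Chars.rfind.go s sub 0 = if sub.isPrefixOf s then 0 else -1 := rfl
theorem pv_go_succ (s sub : List Char) (j : Nat) :
    PySem.Chars.rfind.go s sub (j+1) =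
      if sub.isPrefixOf (s.drop (j+1)) then ((j:Int)+1) else PySem.Chars.rfind.go s sub j := rfl
theorem pv_rfind_def (s sub : List Char) :
    PySem.Chars.rfind s sub = PySem.Chars.rfind.go s sub s.length := rfl

theorem pv_go_le (s sub : List Char) (f : Nat) : PySem.Chars.rfind.go s sub f ≤ (f : Int) := by
  induction f with
  | zero => rw [pv_go_zero]; split <;> omega
  | succ j ih =>
      rw [pv_go_succ]; split
      · push_cast; omega
      · omega

theorem pv_neg_one_le_go (s sub : List Char) (f : Nat) : -1 ≤ PySem.Chars.rfind.go s sub f := by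
  induction f with
  | zero => rw [pv_go_zero]; split <;> omega
  | succ j ih =>
      rw [pv_go_succ]; split
      · omega
      · exact ih

theorem pv_neg_one_le_rfind (xs sub : List Char) : -1 ≤ PySem.Chars.rfind xs sub := by
  rw [pv_rfind_def]; exact pv_neg_one_le_go _ _ _

theorem pv_prefix_single (p a : Char) (l : List Char) :
    List.isPrefixOf [p] (a :: l) = (p == a) := by
  simp [List.isPrefixOf]

-- scanning for [p] from a position strictly inside xs ignores an appended character
theorem pv_go_append (xs : List Char) (c p : Char) (f : Nat) (hf : f < xs.length) :
    PySem.Chars.rfind.go (xs ++ [c]) [p] f = PySem.Chars.rfind.go xs [p] f := by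
  induction f with
  | zero =>
      rw [pv_go_zero, pv_go_zero]
      cases xs with
      | nil => simp at hf
      | cons a t => simp [pv_prefix_single]
  | succ j ih =>
      rw [pv_go_succ, pv_go_succ,
        List.drop_append_of_le_length (by omega)]
      have hne : xs.drop (j+1) ≠ [] := by
        simp; omega
      cases hd : xs.drop (j+1) with
      | nil => exact absurd hd hne
      | cons a t =>
          simp only [List.cons_append, pv_prefix_single]
          rw [ih (by omega)]

-- rfind for a single character over a snoc
theorem pv_rfind_snoc (xs : List Char) (c p : Char) :
    PySem.Chars.rfind (xs ++ [c]) [p] =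
      if c == p then (xs.length : Int) else PySem.Chars.rfind xs [p] := by
  rw [pv_rfind_def, List.length_append, List.length_singleton, pv_go_succ]
  have h1 : (xs ++ [c]).drop (xs.length + 1) = [] := by
    simp
  rw [h1]
  simp only [List.isPrefixOf, Bool.false_eq_true, if_false]
  cases xs with
  | nil =>
      simp only [List.nil_append, List.length_nil]
      rw [pv_go_zero, pv_rfind_def]
      simp only [List.length_nil]
      rw [pv_go_zero]
      simp [pv_prefix_single, BEq.comm]
  | cons a t =>
      rw [List.length_cons]
      rw [pv_go_succ]
      have h2 : ((a :: t) ++ [c]).drop (t.length + 1) = [c] := by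
        rw [List.drop_append_of_le_length (by simp)]
        simp
      rw [h2, pv_prefix_single]
      rw [pv_rfind_def, List.length_cons, pv_go_succ]
      have h3 : (a :: t).drop (t.length + 1) = [] := by simp
      rw [h3]
      simp only [List.isPrefixOf, Bool.false_eq_true, if_false]
      rw [pv_go_append _ _ _ _ (by simp)]
      by_cases hc : c = p
      · simp [hc]
      · simp [hc, Ne.symm hc]

theorem pv_rfind_lt (xs : List Char) (p : Char) :
    (PySem.Chars.rfind xs [p] + 1).toNat ≤ xs.length := by
  cases xs with
  | nil =>
      rw [pv_rfind_def]
      simp only [List.length_nil]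
      rw [pv_go_zero]; simp [List.isPrefixOf]
  | cons a t =>
      rw [pv_rfind_def, List.length_cons, pv_go_succ]
      have h3 : (a :: t).drop (t.length + 1) = [] := by simp
      rw [h3]
      simp only [List.isPrefixOf, Bool.false_eq_true, if_false]
      have := pv_go_le (a :: t) [p] t.length
      omega

-- accumulator lemma for A's loop
theorem pvALoop_append (cs : List Char) (n : Nat) (a b : List Char) :
    pvALoop cs n (a ++ b) = a ++ pvALoop cs n b := by
  induction n generalizing b with
  | zero => rfl
  | succ k ih =>
      simp only [pvALoop]
      split
      · rfl
      · rw [List.append_assoc, ih]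

-- A's loop returns immediately when the current character is '.'
theorem pvALoop_dot (cs : List Char) (k : Nat) (h : cs.getD k '?' = '.') :
    pvALoop cs k [] = [] := by
  cases k with
  | zero => rfl
  | succ j =>
      simp only [pvALoop]
      have : PySem.List.pyGetD cs ((j : Int) + 1) '?' = '.' := by
        have := PySem.List.pyGetD_natCast cs (j+1) '?'
        push_cast at this
        rw [this, h]
      simp [this]

-- invariant: A's collected characters, reversed, are exactly the digits of the
-- segment of line[:m] after its last '.' — i.e. what B slices out and filters
theorem pv_main (cs : List Char) (m : Nat) (hm : m ≤ cs.length)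
    (h : ¬ cs.getD m '?' = '.') :
    (pvALoop cs m []).reverse =
      ((cs.take m).drop (PySem.Chars.rfind (cs.take m) ['.'] + 1).toNat).filter
        (fun c => PySem.Chars.isdigit c) := by
  induction m with
  | zero => simp [pvALoop]
  | succ k ih =>
      have hk : k < cs.length := by omega
      have hget1 : PySem.List.pyGetD cs ((k : Int) + 1) '?' = cs.getD (k+1) '?' := by
        have := PySem.List.pyGetD_natCast cs (k+1) '?'
        push_cast at this
        rw [this]
      have hget0 : PySem.List.pyGetD cs (k : Int) '?' = cs[k] := by
        rw [PySem.List.pyGetD_natCast, List.getD_eq_getElem _ _ hk]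
      have htake : cs.take (k+1) = cs.take k ++ [cs[k]] := by
        rw [List.take_add_one, List.getElem?_eq_getElem hk]; rfl
      simp only [pvALoop, hget1, hget0]
      rw [if_neg (by simpa using h)]
      set d := (if PySem.Chars.isdigit cs[k] then [cs[k]] else []) with hd
      have hloop : pvALoop cs k ([] ++ d) = d ++ pvALoop cs k [] := by
        rw [List.nil_append, ← List.append_nil d, pvALoop_append, List.append_nil]
      rw [hloop]
      rw [List.reverse_append]
      have hdrev : d.reverse = d := by rw [hd]; split <;> rfl
      rw [hdrev]
      by_cases hc : cs[k] = '.'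
      · -- the character just below is the separator: the segment is empty
        have hz : pvALoop cs k [] = [] :=
          pvALoop_dot cs k (by rw [List.getD_eq_getElem _ _ hk, hc])
        have hdz : d = [] := by rw [hd, hc]; rfl
        rw [hz, hdz, htake, hc, pv_rfind_snoc, if_pos (by decide)]
        rw [List.drop_eq_nil_of_le (by simp; omega)]
        simp
      · -- ordinary character: the segment grows by one on the right
        have hlen : ((PySem.Chars.rfind (cs.take k) ['.'] + 1)).toNat ≤ (cs.take k).length :=
          pv_rfind_lt _ _
        rw [htake, pv_rfind_snoc, if_neg (by simp [hc]),
          List.drop_append_of_le_length hlen, List.filter_append]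
        rw [ih (by omega) (by rw [List.getD_eq_getElem _ _ hk]; exact hc)]
        congr 1
        rw [hd]
        by_cases hdig : PySem.Chars.isdigit cs[k]
        · simp [hdig]
        · simp [hdig]

-- with 0 < index ≤ len, line.rfind(".", 0, index) is rfind on the prefix line[:index]
theorem pv_rfindFrom (cs : List Char) (index : Int) (h0 : 0 < index) (hle : index ≤ cs.length) :
    PySem.Chars.rfindFrom cs ['.'] 0 (some index) =
      PySem.Chars.rfind (cs.take index.toNat) ['.'] := by
  simp only [PySem.Chars.rfindFrom]
  rw [if_neg (show ¬((cs.length:Int) < index) by omega)]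
  rw [if_neg (show ¬(index < 0) by omega)]
  rw [if_neg (show ¬((0:Int) < 0) by omega)]
  rw [if_neg (show ¬(index < 0) by omega)]
  rw [Int.toNat_zero, List.drop_zero]
  split
  · omega
  · omega

theorem pv_final (line : String) (index : Int)
    (hpre : 0 < index → index < (line.toList.length : Int)) :
    checkLeftNeighbours line index = checkLeftNeighbours_alt line index := by
  by_cases hi : index ≤ 0
  · have : index.toNat = 0 := by omega
    simp [checkLeftNeighbours, checkLeftNeighbours_alt, hi, this, pvALoop]
  · have h0 : 0 < index := by omega
    have hm : index.toNat < line.toList.length := by have := hpre h0; omega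
    have hidx : index = (index.toNat : Int) := by omega
    set cs := line.toList with hcs
    have hpg : PySem.List.pyGetD cs index '?' = cs[index.toNat] :=
      PySem.List.pyGetD_eq_getElem cs '?' (by omega) (by omega)
    have hgd : cs.getD index.toNat '?' = cs[index.toNat] := List.getD_eq_getElem _ _ hm
    by_cases hdot : cs[index.toNat] = '.'
    · have hz : pvALoop cs index.toNat [] = [] := pvALoop_dot cs _ (by rw [hgd, hdot])
      simp [checkLeftNeighbours, checkLeftNeighbours_alt, ← hcs, hz, hpg, hdot, hi]
    · have hcond : (index ≤ 0 || (PySem.List.pyGetD cs index '?' == '.')) = false := by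
        simp [hi, hpg, hdot]
      have hstart := pv_rfindFrom cs index h0 (by omega)
      set s := PySem.Chars.rfind (cs.take index.toNat) ['.'] with hs
      have hs1 : -1 ≤ s := pv_neg_one_le_rfind _ _
      have hslice : PySem.List.slice cs (some (s + 1)) (some index) =
          (cs.take index.toNat).drop (s + 1).toNat := by
        rw [PySem.List.slice_toNat _ (by omega) (by omega)]
        rw [List.drop_take]
      have hmain := pv_main cs index.toNat (by omega) (by rw [hgd]; exact hdot)
      conv_rhs => rw [checkLeftNeighbours_alt]
      simp only [← hcs, hcond, Bool.false_eq_true, if_false, hstart, hslice]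
      have hflt : List.filter (fun c => PySem.Chars.isdigit c)
          (List.drop (s + 1).toNat (List.take index.toNat cs)) =
          (pvALoop cs index.toNat []).reverse := by
        rw [hs]; exact hmain.symm
      rw [hflt]
      conv_lhs => rw [checkLeftNeighbours]
      simp only [← hcs]
      by_cases hz : pvALoop cs index.toNat [] = []
      · simp [hz]
      · simp [hz]

-- ===== VERDICT (by name: the statement is the Claim_ definition above) =====
theorem checkLeftNeighbours_spec : Claim_equal_checkLeftNeighbours := by
  intro line index hdom hpre
  unfold Spec_checkLeftNeighbours
  apply pv_final
  intro h0
  have := hpre h0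
  simpa [PySem.Str.len] using this
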